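-- pv_equiv track=rewrite | github.com/SmashingBumpkin/Python | HW8-req/program01.eng.py | board_winner
-- ===== SOURCE A (Python) =====
-- def board_winner(board: list):
--     blacks = [1 for line in board for posn in line if posn == 'B']
--     whites = [1 for line in board for posn in line if posn == 'W']
--     if len(blacks) > len(whites):
--         return [1,0,0]
--     elif len(whites) > len(blacks):
--         return [0,1,0]
--     else:
--         return [0,0,1]
-- ===== SOURCE B (Python) =====
-- _VALUE = {'B': 1, 'W': -1}
--
-- def board_winner(board: list):
--     s = sum(_VALUE.get(posn, 0) for line in board for posn in line)
--     return [int(s > 0), int(s < 0), int(s == 0)]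
-- ===== Notes on version B (the rewrite author's own statement) =====
-- stated objective: alternative
-- what changed: Instead of counting blacks and whites separately and comparing the two counts, B folds a single signed score (+1 per 'B', -1 per 'W' via a lookup table) over the board and constructs the result vector arithmetically from the sign of that score.
import Mathlib
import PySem

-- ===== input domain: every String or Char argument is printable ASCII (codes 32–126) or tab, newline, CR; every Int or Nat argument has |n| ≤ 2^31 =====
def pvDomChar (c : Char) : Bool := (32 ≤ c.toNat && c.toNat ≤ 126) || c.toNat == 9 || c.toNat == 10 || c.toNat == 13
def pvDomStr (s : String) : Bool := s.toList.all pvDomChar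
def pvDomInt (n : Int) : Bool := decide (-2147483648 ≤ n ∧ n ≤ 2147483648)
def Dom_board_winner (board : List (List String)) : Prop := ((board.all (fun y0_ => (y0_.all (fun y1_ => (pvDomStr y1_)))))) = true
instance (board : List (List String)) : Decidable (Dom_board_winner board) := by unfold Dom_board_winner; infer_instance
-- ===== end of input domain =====

-- B replaces A's two-count-and-compare with a single signed score (+1/'B', -1/'W' from a lookup table) whose sign arithmetically yields the result vector (alternative decomposition, not claimed faster).


-- ===== PORT A =====
-- blacks/whites: the two comprehensions, each a list of 1s
def board_winner (board : List (List String)) : List Int :=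
  let blacks : List Int := board.flatMap (fun line => (line.filter (fun posn => posn == "B")).map (fun _ => 1))
  let whites : List Int := board.flatMap (fun line => (line.filter (fun posn => posn == "W")).map (fun _ => 1))
  if blacks.length > whites.length then [1, 0, 0]
  else if whites.length > blacks.length then [0, 1, 0]
  else [0, 0, 1]

-- ===== PORT B =====
-- the module-level _VALUE table
def bwValue : PySem.Dict String Int := PySem.Dict.ofList [("B", (1:Int)), ("W", -1)]

-- sum of the generator = fold of (+ table lookup) over all cells; result built from the sign
def board_winner_alt (board : List (List String)) : List Int :=
  let s : Int := board.foldl (fun acc line =>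
    line.foldl (fun (acc : Int) posn => acc + PySem.Dict.getD bwValue posn 0) acc) 0
  [if s > 0 then 1 else 0, if s < 0 then 1 else 0, if s == 0 then 1 else 0]

-- ===== PRECONDITION & SPEC =====
def Spec_board_winner (board : List (List String)) (out : List Int) : Prop := out = board_winner_alt board
instance (board : List (List String)) (out : List Int) : Decidable (Spec_board_winner board out) := by unfold Spec_board_winner; infer_instance

-- ===== CLAIM (what is proved, stated in full; the proofs are below) =====
def Claim_equal_board_winner : Prop := ∀ (board : List (List String)), Dom_board_winner board → Spec_board_winner board (board_winner board)

-- ===== LEMMAS AND PROOFS =====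
-- the literal table lookup, evaluated
theorem bwValue_getD (p : String) : PySem.Dict.getD bwValue p 0 = if p = "B" then 1 else if p = "W" then -1 else 0 := by
  have h : bwValue = PySem.Dict.mk [("B", (1:Int)), ("W", -1)] := by decide
  rw [h]
  by_cases h1 : p = "B"
  · subst h1; simp [PySem.Dict.getD, PySem.Dict.get?_mk_cons]
  · by_cases h2 : p = "W"
    · subst h2; simp [PySem.Dict.getD, PySem.Dict.get?_mk_cons]
    · simp [PySem.Dict.getD, h1, h2, Ne.symm h1, Ne.symm h2, PySem.Dict.get?]

-- the inner fold adds (#B - #W) of the line to the accumulator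
theorem score_foldl_line (line : List String) (a : Int) :
    line.foldl (fun (acc : Int) posn => acc + PySem.Dict.getD bwValue posn 0) a
      = a + ((line.filter (fun p => p == "B")).length : Int)
          - ((line.filter (fun p => p == "W")).length : Int) := by
  induction line generalizing a with
  | nil => simp
  | cons x xs ih =>
    rw [List.foldl_cons, ih, bwValue_getD]
    by_cases hB : x = "B"
    · subst hB; simp; push_cast; ring
    · by_cases hW : x = "W"
      · subst hW; simp; push_cast; ring
      · simp [hB, hW]

-- the outer fold yields blacks − whites over the whole board
theorem score_foldl_board (board : List (List String)) (a : Int) :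
    board.foldl (fun acc line =>
        line.foldl (fun (acc : Int) posn => acc + PySem.Dict.getD bwValue posn 0) acc) a
      = a + ((board.flatMap (fun line => (line.filter (fun p => p == "B")).map (fun _ => (1 : Int)))).length : Int)
          - ((board.flatMap (fun line => (line.filter (fun p => p == "W")).map (fun _ => (1 : Int)))).length : Int) := by
  induction board generalizing a with
  | nil => simp
  | cons l ls ih =>
    rw [List.foldl_cons, score_foldl_line, ih]
    simp only [List.flatMap_cons, List.length_append, List.length_map]
    push_cast; ring

-- ===== VERDICT (by name: the statement is the Claim_ definition above) =====
theorem board_winner_spec : Claim_equal_board_winner := by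
  intro board _
  unfold Spec_board_winner board_winner board_winner_alt
  rw [score_foldl_board]
  set nb := ((board.flatMap (fun line => (line.filter (fun p => p == "B")).map (fun _ => (1 : Int)))).length)
  set nw := ((board.flatMap (fun line => (line.filter (fun p => p == "W")).map (fun _ => (1 : Int)))).length)
  simp only [zero_add, gt_iff_lt, beq_iff_eq]
  by_cases h1 : nw < nb
  · rw [if_pos h1, if_pos (by omega : (0:Int) < (nb:Int) - nw), if_neg (by omega : ¬((nb:Int) - nw < 0)), if_neg (by omega : ¬((nb:Int) - nw = 0))]
  · by_cases h2 : nb < nw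
    · rw [if_neg h1, if_pos h2, if_neg (by omega : ¬((0:Int) < (nb:Int) - nw)), if_pos (by omega : (nb:Int) - nw < 0), if_neg (by omega : ¬((nb:Int) - nw = 0))]
    · rw [if_neg h1, if_neg h2, if_neg (by omega : ¬((0:Int) < (nb:Int) - nw)), if_neg (by omega : ¬((nb:Int) - nw < 0)), if_pos (by omega : (nb:Int) - nw = 0)]
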